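-- pv_equiv track=rewrite | github.com/neuropsychology/NeuroKit | neurokit2/signal/signal_tidypeaksonsets.py | _ensure_starts_with_onset_ends_with_peak
-- ===== SOURCE A (Python) =====
-- def _ensure_starts_with_onset_ends_with_peak(peaks, onsets):
--     """
--     Make sure that the first onset is before the first peak, and the last peak is after the last onset
--     """
--
--     finished = False
--     while not finished:
--         if len(onsets) > 0 and len(peaks) > 0 and onsets[0] > peaks[0]:
--             peaks = peaks[1:]
--         else:
--             finished = True
--
--     finished = False
--     while not finished:
--         if len(peaks) > 0 and len(onsets) > 0 and peaks[-1] < onsets[-1]: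
--             onsets = onsets[:-1]
--         else:
--             finished = True
--
--     return peaks, onsets
-- ===== SOURCE B (Python) =====
-- def _ensure_starts_with_onset_ends_with_peak(peaks, onsets):
--     # One forward scan counts leading peaks before the first onset, one backward
--     # scan counts trailing onsets after the last kept peak; one slice each,
--     # instead of A's slice-per-iteration loops.
--     if onsets:
--         first = onsets[0]
--         i = 0
--         n = len(peaks)
--         while i < n and peaks[i] < first:
--             i += 1
--         peaks = peaks[i:]
--         if peaks:
--             last = peaks[-1]
--             j = len(onsets)
--             while j > 0 and onsets[j - 1] > last:
--                 j -= 1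
--             onsets = onsets[:j]
--     return peaks, onsets
-- ===== Notes on version B (the rewrite author's own statement) =====
-- stated objective: alternative
-- what changed: Instead of A's while-loops that re-slice the list on every iteration (peaks = peaks[1:], onsets = onsets[:-1], quadratic in the number of trimmed elements), B scans once from the front to count leading peaks before the first onset and once from the back to count trailing onsets after the last kept peak, then takes one slice each.
import Mathlib
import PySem

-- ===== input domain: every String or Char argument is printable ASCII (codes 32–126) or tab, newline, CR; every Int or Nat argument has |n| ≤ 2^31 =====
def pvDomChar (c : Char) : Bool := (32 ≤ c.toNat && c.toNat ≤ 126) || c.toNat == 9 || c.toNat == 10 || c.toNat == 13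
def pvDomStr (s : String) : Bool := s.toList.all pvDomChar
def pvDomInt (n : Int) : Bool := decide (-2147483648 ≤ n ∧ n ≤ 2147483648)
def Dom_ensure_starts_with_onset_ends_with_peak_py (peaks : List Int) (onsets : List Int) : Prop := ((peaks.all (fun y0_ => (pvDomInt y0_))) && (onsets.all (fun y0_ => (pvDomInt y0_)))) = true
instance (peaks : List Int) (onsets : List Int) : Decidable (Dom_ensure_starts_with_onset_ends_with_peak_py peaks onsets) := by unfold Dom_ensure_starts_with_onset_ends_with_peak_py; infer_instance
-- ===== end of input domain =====

-- B replaces A's slice-per-iteration while-loops with two single scans and one slice each (objective: alternative).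

-- ===== PORT A =====
-- first while loop of A: while onsets and peaks and onsets[0] > peaks[0]: peaks = peaks[1:]
def pvTrimPeaksA (onsets : List Int) (peaks : List Int) : List Int :=
  if onsets.length > 0 ∧ peaks.length > 0 ∧ onsets.head! > peaks.head! then
    pvTrimPeaksA onsets peaks.tail
  else peaks
termination_by peaks.length
decreasing_by
  rename_i h
  cases peaks with
  | nil => simp at h
  | cons p ps => simp [List.tail]

-- second while loop of A: while peaks and onsets and peaks[-1] < onsets[-1]: onsets = onsets[:-1]
def pvTrimOnsetsA (peaks : List Int) (onsets : List Int) : List Int :=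
  if peaks.length > 0 ∧ onsets.length > 0 ∧ peaks.getLast! < onsets.getLast! then
    pvTrimOnsetsA peaks onsets.dropLast
  else onsets
termination_by onsets.length
decreasing_by
  rename_i h
  cases onsets with
  | nil => simp at h
  | cons o os => simp [List.length_dropLast]

def ensure_starts_with_onset_ends_with_peak_py (peaks : List Int) (onsets : List Int) : List Int × List Int :=
  let peaks1 := pvTrimPeaksA onsets peaks
  let onsets1 := pvTrimOnsetsA peaks1 onsets
  (peaks1, onsets1)

-- ===== PORT B =====
-- B's forward scan: number of leading peaks strictly below `first`
def pvCountLead (first : Int) : List Int → Nat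
  | [] => 0
  | p :: ps => if p < first then pvCountLead first ps + 1 else 0

-- B's backward scan (index j walks from the end): number of trailing onsets strictly above `last`
def pvCountTrail (last : Int) : List Int → Nat
  | [] => 0
  | o :: os => if o > last then pvCountTrail last os + 1 else 0

def ensure_starts_with_onset_ends_with_peak_py_alt (peaks : List Int) (onsets : List Int) : List Int × List Int :=
  match onsets with
  | [] => (peaks, onsets)
  | o :: _ =>
    let peaks1 := peaks.drop (pvCountLead o peaks)
    if peaks1.isEmpty then (peaks1, onsets)
    else
      let j := onsets.length - pvCountTrail peaks1.getLast! onsets.reverse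
      (peaks1, onsets.take j)

-- ===== PRECONDITION & SPEC =====
def Spec_ensure_starts_with_onset_ends_with_peak_py (peaks : List Int) (onsets : List Int) (out : List Int × List Int) : Prop := out = ensure_starts_with_onset_ends_with_peak_py_alt peaks onsets
instance (peaks : List Int) (onsets : List Int) (out : List Int × List Int) : Decidable (Spec_ensure_starts_with_onset_ends_with_peak_py peaks onsets out) := by unfold Spec_ensure_starts_with_onset_ends_with_peak_py; infer_instance

-- ===== CLAIM (what is proved, stated in full; the proofs are below) =====
def Claim_equal_ensure_starts_with_onset_ends_with_peak_py : Prop := ∀ (peaks : List Int) (onsets : List Int), Dom_ensure_starts_with_onset_ends_with_peak_py peaks onsets → Spec_ensure_starts_with_onset_ends_with_peak_py peaks onsets (ensure_starts_with_onset_ends_with_peak_py peaks onsets)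

-- ===== LEMMAS AND PROOFS =====

theorem pvTrimPeaksA_nil_onsets (peaks : List Int) : pvTrimPeaksA [] peaks = peaks := by
  unfold pvTrimPeaksA; simp

theorem pvTrimPeaksA_eq_drop (o : Int) (rest peaks : List Int) :
    pvTrimPeaksA (o :: rest) peaks = peaks.drop (pvCountLead o peaks) := by
  induction peaks with
  | nil => unfold pvTrimPeaksA pvCountLead; simp
  | cons p ps ih =>
    rw [pvTrimPeaksA]
    by_cases h : p < o
    · rw [if_pos (by simp; omega)]
      rw [List.tail_cons, ih]
      simp [pvCountLead, h]
    · rw [if_neg (by simp; omega)]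
      simp [pvCountLead, h]

theorem pvTrimOnsetsA_nil_peaks (onsets : List Int) : pvTrimOnsetsA [] onsets = onsets := by
  unfold pvTrimOnsetsA; simp

theorem pvCountTrail_le (x : Int) (l : List Int) : pvCountTrail x l ≤ l.length := by
  induction l with
  | nil => simp [pvCountTrail]
  | cons a as ih => rw [pvCountTrail]; split <;> simp [ih]

theorem pvTrimOnsetsA_eq_take (ps : List Int) (x : Int) (hx : ps.getLast? = some x)
    (onsets : List Int) :
    pvTrimOnsetsA ps onsets = onsets.take (onsets.length - pvCountTrail x onsets.reverse) := by
  have hps : ps ≠ [] := by intro hn; simp [hn] at hx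
  induction onsets using List.reverseRecOn with
  | nil => rw [pvTrimOnsetsA]; simp
  | append_singleton os o ih =>
    rw [pvTrimOnsetsA]
    have hrev : (os ++ [o]).reverse = o :: os.reverse := by simp
    by_cases h : x < o
    · rw [if_pos]
      · rw [List.dropLast_concat, ih, hrev]
        have hc := pvCountTrail_le x os.reverse
        rw [show pvCountTrail x (o :: os.reverse) = pvCountTrail x os.reverse + 1 from by
          rw [pvCountTrail]; simp [show o > x from h]]
        simp only [List.length_reverse] at hc
        rw [List.length_append, List.take_append_of_le_length (by simp)]
        congr 1
        simp
      · refine ⟨by simpa using List.length_pos_of_ne_nil hps, by simp, ?_⟩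
        simpa [hx] using h
    · rw [if_neg]
      · rw [hrev, show pvCountTrail x (o :: os.reverse) = 0 from by
          rw [pvCountTrail]; simp [show ¬ o > x from by omega]]
        simp
      · rintro ⟨-, -, h3⟩
        simp [hx] at h3
        omega

-- ===== VERDICT (by name: the statement is the Claim_ definition above) =====
theorem ensure_starts_with_onset_ends_with_peak_py_spec : Claim_equal_ensure_starts_with_onset_ends_with_peak_py := by
  intro peaks onsets _
  unfold Spec_ensure_starts_with_onset_ends_with_peak_py
  unfold ensure_starts_with_onset_ends_with_peak_py ensure_starts_with_onset_ends_with_peak_py_alt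
  cases onsets with
  | nil =>
    simp [pvTrimPeaksA_nil_onsets]
    unfold pvTrimOnsetsA; simp
  | cons o rest =>
    simp only [pvTrimPeaksA_eq_drop]
    set ps1 := peaks.drop (pvCountLead o peaks) with hps1
    by_cases h : ps1.isEmpty
    · have hnil : ps1 = [] := by simpa [List.isEmpty_iff] using h
      simp [hnil, pvTrimOnsetsA_nil_peaks]
    · have hne : ps1 ≠ [] := by simpa [List.isEmpty_iff] using h
      cases hL : ps1.getLast? with
      | none => exact absurd (List.getLast?_eq_none_iff.mp hL) hne
      | some x =>
        have hgl : ps1.getLast?.getD 0 = x := by simp [hL]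
        simp [h, pvTrimOnsetsA_eq_take ps1 x hL, hgl]
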